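-- pv_equiv track=rewrite | github.com/AlwaysLearningTech/forensic_message_analyzer | src/reporters/chat_reporter.py | _build_tapback_map
-- ===== SOURCE A (Python) =====
-- from typing import Dict, List, Optional
--
-- def _build_tapback_map(messages: List[Dict]) -> Dict[str, List[Dict]]:
--     """Build guid → [tapback messages] lookup."""
--     tapbacks: Dict[str, List[Dict]] = {}
--     for m in messages:
--         if not m.get('is_tapback'):
--             continue
--         assoc = m.get('associated_message_guid', '')
--         if not assoc:
--             continue
--         # Strip the p:N/ prefix to get the actual guid
--         parts = assoc.split('/')
--         guid = parts[-1] if parts else assoc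
--         if guid:
--             tapbacks.setdefault(guid, []).append(m)
--     return tapbacks
-- ===== SOURCE B (Python) =====
-- def _key(m):
--     """Target guid of a tapback message, or '' if this message is not a grouped tapback."""
--     assoc = m.get('associated_message_guid', '') if m.get('is_tapback') else ''
--     return assoc.split('/')[-1] if assoc else ''
--
-- def _build_tapback_map(messages):
--     keyed = [(_key(m), m) for m in messages]
--     order = []
--     for g, _ in keyed:
--         if g and g not in order:
--             order.append(g)
--     return {g: [m for k, m in keyed if k == g] for g in order}
-- ===== Notes on version B (the rewrite author's own statement) =====
-- stated objective: alternative
-- what changed: Replaces A's single pass that mutates a dict via setdefault/append with a key-extraction pass producing (guid, message) pairs, a first-seen list of distinct non-empty guids, and a per-guid filter that builds each group.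
import Mathlib
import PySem

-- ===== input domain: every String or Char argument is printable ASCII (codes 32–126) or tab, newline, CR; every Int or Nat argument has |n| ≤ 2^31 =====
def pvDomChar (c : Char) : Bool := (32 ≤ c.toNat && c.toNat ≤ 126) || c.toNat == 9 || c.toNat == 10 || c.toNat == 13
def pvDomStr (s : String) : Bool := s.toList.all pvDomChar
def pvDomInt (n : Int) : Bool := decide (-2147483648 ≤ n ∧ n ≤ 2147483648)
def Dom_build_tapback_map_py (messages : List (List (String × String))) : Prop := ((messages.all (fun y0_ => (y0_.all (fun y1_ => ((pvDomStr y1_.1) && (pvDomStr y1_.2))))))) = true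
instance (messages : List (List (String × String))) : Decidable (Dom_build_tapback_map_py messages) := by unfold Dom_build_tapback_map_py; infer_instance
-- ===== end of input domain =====

-- B replaces A's incremental dict mutation (setdefault/append) with a key-extraction pass, a
-- first-seen list of distinct non-empty guids, and a per-guid filter building each group;
-- alternative decomposition, no speed claim.

-- ===== PORT A =====
-- m.get('is_tapback') / m.get('associated_message_guid', '') on a str→str dict: falsy iff
-- missing or empty, so truthiness is ported as 'getD … "" ≠ ""' (exact on the stated domain).
def build_tapback_map_py (messages : List (List (String × String))) : List (String × List (List (String × String))) :=
  (messages.foldl (fun tapbacks m =>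
    if PySem.Dict.getD (⟨m⟩ : PySem.Dict String String) "is_tapback" "" = "" then tapbacks
    else
      let assoc := PySem.Dict.getD (⟨m⟩ : PySem.Dict String String) "associated_message_guid" ""
      if assoc = "" then tapbacks
      else
        let parts := (PySem.Str.split? assoc "/").getD []  -- split? is none only for sep = ""
        let guid := match PySem.List.pyGet? parts (-1) with
          | some g => g
          | none => assoc
        if guid = "" then tapbacks
        else PySem.Dict.modify tapbacks guid [] (fun l => l ++ [m])   -- setdefault(guid, []).append(m)
    ) PySem.Dict.empty).items

-- ===== PORT B =====
-- _key(m): '' marks "not a grouped tapback"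
def pvTapbackKey (m : List (String × String)) : String :=
  if PySem.Dict.getD (⟨m⟩ : PySem.Dict String String) "is_tapback" "" = "" then ""
  else
    let assoc := PySem.Dict.getD (⟨m⟩ : PySem.Dict String String) "associated_message_guid" ""
    if assoc = "" then ""
    else
      let parts := (PySem.Str.split? assoc "/").getD []  -- split? is none only for sep = ""
      match PySem.List.pyGet? parts (-1) with
      | some g => g
      | none => assoc

def build_tapback_map_py_alt (messages : List (List (String × String))) : List (String × List (List (String × String))) :=
  let keyed := messages.map (fun m => (pvTapbackKey m, m))
  let order := keyed.foldl (fun ord p => if p.1 ≠ "" ∧ p.1 ∉ ord then ord ++ [p.1] else ord) []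
  order.map (fun g => (g, (keyed.filter (fun p => p.1 == g)).map (fun p => p.2)))

-- ===== PRECONDITION & SPEC =====
def Spec_build_tapback_map_py (messages : List (List (String × String))) (out : List (String × List (List (String × String)))) : Prop := out = build_tapback_map_py_alt messages
instance (messages : List (List (String × String))) (out : List (String × List (List (String × String)))) : Decidable (Spec_build_tapback_map_py messages out) := by unfold Spec_build_tapback_map_py; infer_instance

-- ===== CLAIM (what is proved, stated in full; the proofs are below) =====
def Claim_equal_build_tapback_map_py : Prop := ∀ (messages : List (List (String × String))), Dom_build_tapback_map_py messages → Spec_build_tapback_map_py messages (build_tapback_map_py messages)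

-- ===== LEMMAS AND PROOFS =====

-- A's loop body, named for the proofs (identical to the lambda in the port)
def pvStepA (tapbacks : PySem.Dict String (List (List (String × String)))) (m : List (String × String)) : PySem.Dict String (List (List (String × String))) :=
    if PySem.Dict.getD (⟨m⟩ : PySem.Dict String String) "is_tapback" "" = "" then tapbacks
    else
      let assoc := PySem.Dict.getD (⟨m⟩ : PySem.Dict String String) "associated_message_guid" ""
      if assoc = "" then tapbacks
      else
        let parts := (PySem.Str.split? assoc "/").getD []  -- split? is none only for sep = ""
        let guid := match PySem.List.pyGet? parts (-1) with
          | some g => g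
          | none => assoc
        if guid = "" then tapbacks
        else PySem.Dict.modify tapbacks guid [] (fun l => l ++ [m])

def pvStepO (ord : List String) (p : String × List (String × String)) : List String :=
  if p.1 ≠ "" ∧ p.1 ∉ ord then ord ++ [p.1] else ord

def pvOrder (messages : List (List (String × String))) : List String :=
  (messages.map (fun m => (pvTapbackKey m, m))).foldl pvStepO []

def pvGroup (messages : List (List (String × String))) (g : String) : List (List (String × String)) :=
  ((messages.map (fun m => (pvTapbackKey m, m))).filter (fun p => p.1 == g)).map (fun p => p.2)

lemma pvA_eq (messages : List (List (String × String))) :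
    build_tapback_map_py messages = (messages.foldl pvStepA PySem.Dict.empty).items := rfl

lemma pvAlt_eq (messages : List (List (String × String))) :
    build_tapback_map_py_alt messages = (pvOrder messages).map (fun g => (g, pvGroup messages g)) := rfl

lemma pvStepA_eq (d : PySem.Dict String (List (List (String × String)))) (m : List (String × String)) :
    pvStepA d m = if pvTapbackKey m = "" then d
                  else PySem.Dict.modify d (pvTapbackKey m) [] (fun l => l ++ [m]) := by
  unfold pvStepA pvTapbackKey
  by_cases h1 : PySem.Dict.getD (⟨m⟩ : PySem.Dict String String) "is_tapback" "" = ""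
  · simp [h1]
  · simp only [if_neg h1]
    by_cases h2 : PySem.Dict.getD (⟨m⟩ : PySem.Dict String String) "associated_message_guid" "" = ""
    · simp [h2]
    · simp only [if_neg h2]

lemma pvMem_foldl_pvStepO (l : List (String × List (String × String))) (init : List String) (g : String) :
    g ∈ l.foldl pvStepO init ↔ g ∈ init ∨ (g ≠ "" ∧ ∃ p ∈ l, p.1 = g) := by
  induction l generalizing init with
  | nil => simp
  | cons p l ih =>
    simp only [List.foldl_cons, ih, pvStepO]
    split_ifs with hp
    · simp only [List.mem_append, List.mem_cons, List.not_mem_nil, or_false]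
      constructor
      · rintro ((h | rfl) | h)
        · exact Or.inl h
        · exact Or.inr ⟨hp.1, p, Or.inl rfl, rfl⟩
        · exact Or.inr ⟨h.1, h.2.choose, Or.inr h.2.choose_spec.1, h.2.choose_spec.2⟩
      · rintro (h | ⟨hne, q, (rfl | hq), hqg⟩)
        · exact Or.inl (Or.inl h)
        · exact Or.inl (Or.inr hqg.symm)
        · exact Or.inr ⟨hne, q, hq, hqg⟩
    · simp only [List.mem_cons]
      constructor
      · rintro (h | h)
        · exact Or.inl h
        · exact Or.inr ⟨h.1, h.2.choose, Or.inr h.2.choose_spec.1, h.2.choose_spec.2⟩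
      · rintro (h | ⟨hne, q, (rfl | hq), hqg⟩)
        · exact Or.inl h
        · have hp1 : q.1 ≠ "" := fun e => hne (hqg.symm.trans e)
          have hmem : q.1 ∈ init := by
            by_contra hc
            exact hp ⟨hp1, hc⟩
          exact Or.inl (hqg ▸ hmem)
        · exact Or.inr ⟨hne, q, hq, hqg⟩

lemma pvMem_pvOrder (messages : List (List (String × String))) (g : String) :
    g ∈ pvOrder messages ↔ g ≠ "" ∧ ∃ m ∈ messages, pvTapbackKey m = g := by
  simp [pvOrder, pvMem_foldl_pvStepO]

lemma pvOrder_append (messages : List (List (String × String))) (m : List (String × String)) :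
    pvOrder (messages ++ [m]) = pvStepO (pvOrder messages) (pvTapbackKey m, m) := by
  simp [pvOrder, List.foldl_append]

lemma pvGroup_append (messages : List (List (String × String))) (m : List (String × String)) (g : String) :
    pvGroup (messages ++ [m]) g = pvGroup messages g ++ (if pvTapbackKey m == g then [m] else []) := by
  simp only [pvGroup, List.map_append, List.filter_append, List.map_append]
  congr 1
  by_cases h : pvTapbackKey m == g <;> simp [h]

lemma pvFind_map_self {β : Type} (order : List String) (f : String → β) (g : String) (h : g ∈ order) :
    (order.map (fun x => (x, f x))).find? (fun p => p.1 == g) = some (g, f g) := by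
  induction order with
  | nil => simp at h
  | cons x order ih =>
    rcases List.mem_cons.mp h with rfl | hmem
    · simp
    · by_cases hx : x = g
      · subst hx; simp
      · simpa [List.find?, hx] using ih hmem

lemma pvMain (messages : List (List (String × String))) :
    (messages.foldl pvStepA PySem.Dict.empty).items = (pvOrder messages).map (fun g => (g, pvGroup messages g)) := by
  induction messages using List.reverseRecOn with
  | nil => rfl
  | append_singleton ms m ih =>
    rw [List.foldl_append, List.foldl_cons, List.foldl_nil, pvStepA_eq,
        pvOrder_append, pvStepO]
    by_cases hk : pvTapbackKey m = ""
    · rw [if_pos hk, ih]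
      have : ¬(pvTapbackKey m ≠ "" ∧ pvTapbackKey m ∉ pvOrder ms) := fun h => h.1 hk
      rw [if_neg this]
      refine List.map_congr_left (fun g hg => ?_)
      have hgne : g ≠ "" := ((pvMem_pvOrder ms g).mp hg).1
      have : (pvTapbackKey m == g) = false := by
        simp only [beq_eq_false_iff_ne]; exact fun e => hgne (e ▸ hk)
      rw [pvGroup_append, this]
      simp
    · rw [if_neg hk, PySem.Dict.modify]
      by_cases hmem : pvTapbackKey m ∈ pvOrder ms
      · -- the guid is already a key: insert updates in place, the order is unchanged
        have hfind : ((ms.foldl pvStepA PySem.Dict.empty).items.find?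
            (fun p => p.1 == pvTapbackKey m)) = some (pvTapbackKey m, pvGroup ms (pvTapbackKey m)) := by
          rw [ih]; exact pvFind_map_self (pvOrder ms) (fun g => pvGroup ms g) _ hmem
        have hgetD : (ms.foldl pvStepA PySem.Dict.empty).getD (pvTapbackKey m) [] = pvGroup ms (pvTapbackKey m) := by
          simp [PySem.Dict.getD, PySem.Dict.get?, hfind]
        have hcont : (ms.foldl pvStepA PySem.Dict.empty).contains (pvTapbackKey m) = true := by
          simp only [PySem.Dict.contains, List.any_eq_true]
          exact ⟨(pvTapbackKey m, pvGroup ms (pvTapbackKey m)), List.mem_of_find?_eq_some hfind, by simp⟩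
        rw [PySem.Dict.items_insert_of_contains _ _ hcont, hgetD, ih, List.map_map]
        have : ¬(pvTapbackKey m ≠ "" ∧ pvTapbackKey m ∉ pvOrder ms) := fun h => h.2 hmem
        rw [if_neg this]
        refine List.map_congr_left (fun g hg => ?_)
        by_cases hgk : g = pvTapbackKey m
        · subst hgk
          simp [pvGroup_append]
        · have h2 : (pvTapbackKey m == g) = false := by simpa using fun e => hgk e.symm
          simp [pvGroup_append, h2, hgk]
      · -- a fresh guid: insert appends, and the new key joins the end of the order
        have hnokey : ∀ m' ∈ ms, pvTapbackKey m' ≠ pvTapbackKey m := by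
          intro m' hm' e
          exact hmem ((pvMem_pvOrder ms (pvTapbackKey m)).mpr ⟨hk, m', hm', e⟩)
        have hfind : ((ms.foldl pvStepA PySem.Dict.empty).items.find?
            (fun p => p.1 == pvTapbackKey m)) = none := by
          rw [ih, List.find?_eq_none]
          rintro ⟨g, v⟩ hx
          obtain ⟨g', hg', he⟩ := List.mem_map.mp hx
          obtain ⟨m', hm', e⟩ := ((pvMem_pvOrder ms g').mp hg').2
          cases he
          simp only [beq_iff_eq]
          exact fun ee => hnokey m' hm' (e.trans ee)
        have hcont : (ms.foldl pvStepA PySem.Dict.empty).contains (pvTapbackKey m) = false := by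
          simp only [PySem.Dict.contains, List.any_eq_false]
          intro p hp
          have := List.find?_eq_none.mp hfind p hp
          simpa using this
        have hgetD : (ms.foldl pvStepA PySem.Dict.empty).getD (pvTapbackKey m) [] = [] := by
          simp [PySem.Dict.getD, PySem.Dict.get?, hfind]
        rw [PySem.Dict.items_insert_of_not_contains _ _ hcont, hgetD, ih,
            if_pos ⟨hk, hmem⟩, List.map_append]
        congr 1
        · refine List.map_congr_left (fun g hg => ?_)
          have h2 : (pvTapbackKey m == g) = false := by
            simpa using fun e => hmem (by rw [e]; exact hg)
          simp [pvGroup_append, h2]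
        · have hgrp : pvGroup ms (pvTapbackKey m) = [] := by
            simp only [pvGroup, List.map_eq_nil_iff, List.filter_eq_nil_iff]
            rintro ⟨g, v⟩ hx
            obtain ⟨m', hm', e⟩ := List.mem_map.mp hx
            simp only [beq_iff_eq]
            intro ee
            exact hnokey m' hm' ((Prod.ext_iff.mp e).1.trans ee)
          simp [pvGroup_append, hgrp]

-- ===== VERDICT (by name: the statement is the Claim_ definition above) =====
theorem build_tapback_map_py_spec : Claim_equal_build_tapback_map_py := by
  intro messages _
  unfold Spec_build_tapback_map_py
  rw [pvA_eq, pvAlt_eq, pvMain]
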